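-- pv_equiv track=rewrite | github.com/anmapie/advent-of-code | 2020/day5/day5.py | find_missing_seat
-- ===== SOURCE A (Python) =====
-- def find_missing_seat(seat_ids):
--     seat_ids.sort()
--     prev_seat = seat_ids[0]
--     curr_seat = seat_ids[0]
--
--     # seat_ids is a full set of integers with one missing
--     for seat_id in seat_ids:
--         prev_seat = curr_seat
--         curr_seat = seat_id
--         if curr_seat - prev_seat > 1:
--             return curr_seat - 1
-- ===== SOURCE B (Python) =====
-- def find_missing_seat(seat_ids):
--     # Hash-set membership formulation instead of sort+scan; return value only (A sorts its argument in place, B does not mutate it).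
--     present = set(seat_ids)
--     lo = min(present)
--     return min((x - 1 for x in present if x > lo and x - 1 not in present), default=None)
-- ===== Notes on version B (the rewrite author's own statement) =====
-- stated objective: alternative
-- what changed: Replaces sort-then-adjacent-scan with a hash set and a single comprehension that picks the smallest element x above the minimum whose predecessor x-1 is absent, returning x-1; it trades the O(n log n) sort for O(n) set passes, though measured wall-clock is the same.
import Mathlib
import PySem

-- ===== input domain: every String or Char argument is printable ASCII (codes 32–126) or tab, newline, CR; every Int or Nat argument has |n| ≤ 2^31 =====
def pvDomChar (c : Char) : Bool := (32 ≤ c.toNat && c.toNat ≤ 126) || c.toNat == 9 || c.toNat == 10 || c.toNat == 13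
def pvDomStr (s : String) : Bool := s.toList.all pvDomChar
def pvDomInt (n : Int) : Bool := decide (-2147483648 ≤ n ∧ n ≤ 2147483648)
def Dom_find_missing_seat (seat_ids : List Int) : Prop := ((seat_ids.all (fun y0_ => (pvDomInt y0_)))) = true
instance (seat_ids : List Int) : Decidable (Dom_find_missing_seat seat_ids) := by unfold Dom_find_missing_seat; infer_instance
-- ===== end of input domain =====

-- B replaces A's sort + adjacent-pair scan by a hash-set membership formulation (a different algorithm, similar measured cost);
-- equivalence is about the RETURN value only: A sorts its argument in place, B does not mutate it.

-- ===== PORT A =====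
-- the for-loop: state is curr_seat (prev_seat is the previous value of curr_seat)
def loopA (curr : Int) : List Int → Option Int
  | [] => none
  | x :: rest => if x - curr > 1 then some (x - 1) else loopA x rest

def find_missing_seat (seat_ids : List Int) : Option Int :=
  let t := PySem.List.sorted seat_ids (fun x => x) false
  match PySem.List.pyGet? t 0 with
  | none => none   -- seat_ids[0] raises IndexError (excluded by Pre_)
  | some h => loopA h t

-- ===== PORT B =====
def find_missing_seat_alt (seat_ids : List Int) : Option Int :=
  let present : PySem.Set Int := PySem.Set.ofList seat_ids
  match PySem.List.min? present (fun x => x) with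
  | none => none   -- min() raises ValueError on the empty set (excluded by Pre_)
  | some lo =>
      PySem.List.min?
        ((present.filter (fun x => lo < x && !(present.contains (x - 1)))).map (fun x => x - 1))
        (fun x => x)

-- ===== PRECONDITION & SPEC =====
-- Pre_ excludes only the empty list, on which A raises IndexError (seat_ids[0]) and B raises ValueError (min of empty set).
def Pre_find_missing_seat (seat_ids : List Int) : Prop := seat_ids ≠ []
instance (seat_ids : List Int) : Decidable (Pre_find_missing_seat seat_ids) := by unfold Pre_find_missing_seat; infer_instance
def pvWitness_find_missing_seat : List Int := [3, 7, 5, 6]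

def Spec_find_missing_seat (seat_ids : List Int) (out : Option Int) : Prop := out = find_missing_seat_alt seat_ids
instance (seat_ids : List Int) (out : Option Int) : Decidable (Spec_find_missing_seat seat_ids out) := by unfold Spec_find_missing_seat; infer_instance

-- ===== CLAIM (what is proved, stated in full; the proofs are below) =====
def Claim_equal_find_missing_seat : Prop := ∀ (seat_ids : List Int), Dom_find_missing_seat seat_ids → Pre_find_missing_seat seat_ids → Spec_find_missing_seat seat_ids (find_missing_seat seat_ids)

-- ===== LEMMAS AND PROOFS =====

-- min? (identity key) characterization: a member below every member is THE min? value
theorem min?_id_eq_some {l : List Int} {v : Int}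
    (hv : v ∈ l) (hmin : ∀ y ∈ l, v ≤ y) :
    PySem.List.min? l (fun x => x) = some v := by
  cases h : PySem.List.min? l (fun x => x) with
  | none =>
      rw [PySem.List.min?_eq_none_iff] at h
      subst h; cases hv
  | some w =>
      have hw : w ∈ l := PySem.List.min?_mem h
      have h1 : w ≤ v := by simpa using PySem.List.min?_isMin h v hv
      have h2 : v ≤ w := hmin w hw
      rw [le_antisymm h1 h2]

-- B returns some (x-1) when x is the least element above the min whose predecessor is absent
theorem B_some (L : List Int) (m x : Int)
    (hm : PySem.List.min? (PySem.Set.ofList L) (fun y => y) = some m)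
    (hxL : x ∈ L) (hmx : m < x) (hx1 : (x - 1) ∉ L)
    (hleast : ∀ z ∈ L, m < z → (z - 1) ∉ L → x ≤ z) :
    find_missing_seat_alt L = some (x - 1) := by
  unfold find_missing_seat_alt
  simp only [hm]
  apply min?_id_eq_some
  · refine List.mem_map.2 ⟨x, List.mem_filter.2 ⟨?_, ?_⟩, rfl⟩
    · exact (PySem.Set.mem_ofList _ _).2 hxL
    · simp only [Bool.and_eq_true, decide_eq_true_eq, Bool.not_eq_true']
      refine ⟨hmx, ?_⟩
      simp only [PySem.Set.contains, List.contains_eq_mem, decide_eq_false_iff_not]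
      intro hc
      exact hx1 ((PySem.Set.mem_ofList _ _).1 hc)
  · intro y hy
    rcases List.mem_map.1 hy with ⟨z, hzf, rfl⟩
    rcases List.mem_filter.1 hzf with ⟨hzmem, hzp⟩
    simp only [Bool.and_eq_true, decide_eq_true_eq, Bool.not_eq_true'] at hzp
    have hzL : z ∈ L := (PySem.Set.mem_ofList _ _).1 hzmem
    have hz1 : (z - 1) ∉ L := by
      intro hc
      have : PySem.Set.contains (PySem.Set.ofList L) (z - 1) = true := by
        simp only [PySem.Set.contains, List.contains_eq_mem, decide_eq_true_eq]
        exact (PySem.Set.mem_ofList _ _).2 hc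
      rw [this] at hzp; exact absurd hzp.2 (by simp)
    have := hleast z hzL hzp.1 hz1
    omega

-- B returns none when every element above the min has its predecessor present
theorem B_none (L : List Int) (m : Int)
    (hm : PySem.List.min? (PySem.Set.ofList L) (fun y => y) = some m)
    (hall : ∀ z ∈ L, m < z → (z - 1) ∈ L) :
    find_missing_seat_alt L = none := by
  unfold find_missing_seat_alt
  simp only [hm]
  rw [PySem.List.min?_eq_none_iff]
  rw [List.map_eq_nil_iff, List.filter_eq_nil_iff]
  intro x hx
  simp only [Bool.and_eq_true, decide_eq_true_eq, Bool.not_eq_true']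
  intro hcontra
  have hxL : x ∈ L := (PySem.Set.mem_ofList _ _).1 hx
  have := hall x hxL hcontra.1
  have : PySem.Set.contains (PySem.Set.ofList L) (x - 1) = true := by
    simp only [PySem.Set.contains, List.contains_eq_mem, decide_eq_true_eq]
    exact (PySem.Set.mem_ofList _ _).2 this
  rw [this] at hcontra
  exact absurd hcontra.2 (by simp)

-- the loop invariant: scanning a sorted suffix t with current element c, where
-- every integer of [m, c] is in L and every element of L is ≤ c or still in t
theorem loopA_char (L : List Int) (m : Int)
    (hm : PySem.List.min? (PySem.Set.ofList L) (fun y => y) = some m) :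
    ∀ (t : List Int) (c : Int),
      t.Pairwise (· ≤ ·) →
      (∀ x ∈ t, c ≤ x) →
      (∀ x ∈ t, x ∈ L) →
      (∀ y : Int, m ≤ y → y ≤ c → y ∈ L) →
      (∀ y ∈ L, y ≤ c ∨ y ∈ t) →
      m ≤ c →
      loopA c t = find_missing_seat_alt L := by
  intro t
  induction t with
  | nil =>
      intro c _ _ _ hintv hcover hmc
      rw [B_none L m hm]
      · rfl
      · intro z hz hmz
        have := hcover z hz
        rcases this with hzc | hzt
        · exact hintv (z - 1) (by omega) (by omega)
        · cases hzt
  | cons x rest ih =>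
      intro c hpw hge hsub hintv hcover hmc
      have hcx : c ≤ x := hge x (List.mem_cons_self)
      have hrest_ge : ∀ y ∈ rest, x ≤ y := by
        intro y hy; exact (List.pairwise_cons.1 hpw).1 y hy
      show (if x - c > 1 then some (x - 1) else loopA x rest) = _
      by_cases hgap : x - c > 1
      · rw [if_pos hgap]
        refine (B_some L m x hm (hsub x List.mem_cons_self) (by omega) ?_ ?_).symm
        · intro hc
          rcases hcover (x - 1) hc with h1 | h1
          · omega
          · rcases List.mem_cons.1 h1 with h2 | h2
            · omega
            · have := hrest_ge (x - 1) h2; omega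
        · intro z hzL hmz hz1
          rcases hcover z hzL with h1 | h1
          · exfalso; exact hz1 (hintv (z - 1) (by omega) (by omega))
          · rcases List.mem_cons.1 h1 with h2 | h2
            · omega
            · have := hrest_ge z h2; omega
      · rw [if_neg hgap]
        apply ih x (List.pairwise_cons.1 hpw).2 hrest_ge
          (fun y hy => hsub y (List.mem_cons_of_mem _ hy))
        · intro y hmy hyx
          by_cases hyc : y ≤ c
          · exact hintv y hmy hyc
          · have hx : x ∈ L := hsub x List.mem_cons_self
            have : y = x := by omega
            rw [this]; exact hx
        · intro y hyL
          rcases hcover y hyL with h1 | h1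
          · left; omega
          · rcases List.mem_cons.1 h1 with h2 | h2
            · left; omega
            · right; exact h2
        · omega

theorem main_equiv (L : List Int) (hne : L ≠ []) :
    find_missing_seat L = find_missing_seat_alt L := by
  have htne : PySem.List.sorted L (fun x => x) false ≠ [] := by
    rw [Ne, PySem.List.sorted_eq_nil_iff]; exact hne
  obtain ⟨h, tail, ht⟩ := List.exists_cons_of_ne_nil htne
  have hmem : ∀ y, y ∈ PySem.List.sorted L (fun x => x) false ↔ y ∈ L := by
    intro y; rw [PySem.List.mem_sorted]
  have hhL : h ∈ L := (hmem h).1 (by rw [ht]; exact List.mem_cons_self)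
  have hhmin : ∀ y ∈ L, h ≤ y := by
    intro y hy
    exact PySem.List.key_head_sorted_le L (fun x => x) ht y hy
  -- h is also the min? of the deduplicated set
  have hm : PySem.List.min? (PySem.Set.ofList L) (fun y => y) = some h := by
    apply min?_id_eq_some
    · exact (PySem.Set.mem_ofList _ _).2 hhL
    · intro y hy; exact hhmin y ((PySem.Set.mem_ofList _ _).1 hy)
  have hpw : (PySem.List.sorted L (fun x => x) false).Pairwise (· ≤ ·) := by
    have := PySem.List.sorted_pairwise (xs := L) (key := fun x => x)
    simpa using this
  unfold find_missing_seat
  simp only [ht]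
  have : PySem.List.pyGet? (h :: tail) 0 = some h := by
    simp [PySem.List.pyGet?, PySem.List.pyIdx?]
  rw [this]
  apply loopA_char L h hm (h :: tail) h (by rw [← ht]; exact hpw)
  · intro x hx
    exact hhmin x ((hmem x).1 (by rw [ht]; exact hx))
  · intro x hx; exact (hmem x).1 (by rw [ht]; exact hx)
  · intro y h1 h2
    have : y = h := le_antisymm h2 h1
    rw [this]; exact hhL
  · intro y hyL; right; rw [← ht]; exact (hmem y).2 hyL
  · exact le_refl h

-- ===== VERDICT (by name: the statement is the Claim_ definition above) =====
theorem find_missing_seat_spec : Claim_equal_find_missing_seat := by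
  intro seat_ids _ hpre
  exact main_equiv seat_ids hpre
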